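-- pv_equiv track=rewrite | github.com/abelPareja/Trabajo_7 | Trabajo_7/palindromo_sub cadena.py | sinRep
-- ===== SOURCE A (Python) =====
-- def sinRep(cadena):
--     c = 0
--     for i in cadena:
--         for j in cadena:
--             if(i == j):
--                 c = c+1
--     if (c == len(cadena) ):
--         c = 1
--     return c
-- ===== SOURCE B (Python) =====
-- def sinRep(cadena):
--     freq = {}
--     for ch in cadena:
--         freq[ch] = freq.get(ch, 0) + 1
--     c = sum(f * f for f in freq.values())
--     return 1 if c == len(cadena) else c
-- ===== Notes on version B (the rewrite author's own statement) =====
-- stated objective: faster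
-- what changed: Replaced A's nested scan over all character pairs by a single pass building a frequency dict, then summing squared counts.
import Mathlib
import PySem

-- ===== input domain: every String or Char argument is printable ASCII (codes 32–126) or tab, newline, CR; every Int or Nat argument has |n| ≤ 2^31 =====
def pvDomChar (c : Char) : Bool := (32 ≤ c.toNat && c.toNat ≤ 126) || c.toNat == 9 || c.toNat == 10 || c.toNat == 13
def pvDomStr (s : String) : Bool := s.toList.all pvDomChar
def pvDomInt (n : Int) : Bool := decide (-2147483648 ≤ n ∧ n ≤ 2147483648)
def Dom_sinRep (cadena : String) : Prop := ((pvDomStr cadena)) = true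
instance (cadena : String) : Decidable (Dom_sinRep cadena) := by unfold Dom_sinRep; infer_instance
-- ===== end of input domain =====

-- B replaces A's quadratic double scan by a one-pass frequency dict and a sum of squared counts (asymptotically faster).

-- ===== PORT A =====
def sinRep (cadena : String) : Int :=
  let xs := cadena.toList
  let c : Int := xs.foldl (fun c i => xs.foldl (fun c j => if i == j then c + 1 else c) c) 0
  if c = PySem.Str.len cadena then 1 else c

-- ===== PORT B =====
def sinRep_alt (cadena : String) : Int :=
  let freq := cadena.toList.foldl (fun d ch => d.insert ch (d.getD ch 0 + 1)) PySem.Dict.empty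
  let c : Int := (freq.values.map (fun f => f * f)).sum
  if c = PySem.Str.len cadena then 1 else c

-- ===== PRECONDITION & SPEC =====
def Spec_sinRep (cadena : String) (out : Int) : Prop := out = sinRep_alt cadena
instance (cadena : String) (out : Int) : Decidable (Spec_sinRep cadena out) := by unfold Spec_sinRep; infer_instance

-- ===== CLAIM (what is proved, stated in full; the proofs are below) =====
def Claim_equal_sinRep : Prop := ∀ (cadena : String), Dom_sinRep cadena → Spec_sinRep cadena (sinRep cadena)

-- ===== LEMMAS AND PROOFS =====

-- A's double loop sums, over each position i, the number of positions equal to it.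
theorem sinRep_A_sum (xs : List Char) :
    xs.foldl (fun c i => xs.foldl (fun c j => if i == j then c + 1 else c) c) 0
      = (xs.map (fun i => (xs.count i : Int))).sum := by
  have hin : ∀ (i : Char) (a : Int),
      xs.foldl (fun c j => if i == j then c + 1 else c) a = a + (xs.count i : Int) := by
    intro i a
    rw [PySem.List.foldl_count_if (fun j => i == j) xs a]
    have : xs.countP (fun j => i == j) = xs.count i := by
      simp [List.count, BEq.comm]
    rw [this]
  calc xs.foldl (fun c i => xs.foldl (fun c j => if i == j then c + 1 else c) c) 0
      = xs.foldl (fun c i => c + (xs.count i : Int)) 0 := by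
        exact List.foldl_ext _ _ 0 (fun a b _ => hin b a)
    _ = (xs.map (fun i => (xs.count i : Int))).sum := by
        rw [PySem.List.foldl_add xs (fun i => (xs.count i : Int)) 0]; simp

-- Σ_{i ∈ xs} count i  =  Σ_{k distinct} (count k)²
theorem sum_count_eq_sum_sq (xs : List Char) :
    (xs.map (fun i => (xs.count i : Int))).sum
      = ((PySem.Set.ofList xs).map (fun k => (xs.count k : Int) * (xs.count k : Int))).sum := by
  rw [Finset.sum_list_map_count xs (fun i => (xs.count i : Int))]
  have h1 : (PySem.Set.ofList xs).toFinset = xs.toFinset := by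
    ext a; simp [PySem.Set.mem_ofList]
  rw [← List.sum_toFinset _ (PySem.Set.nodup_ofList xs), h1]
  refine Finset.sum_congr rfl fun m _ => ?_
  simp

-- ===== VERDICT (by name: the statement is the Claim_ definition above) =====
theorem sinRep_spec : Claim_equal_sinRep := by
  intro cadena _
  unfold Spec_sinRep sinRep sinRep_alt
  dsimp only
  rw [sinRep_A_sum, sum_count_eq_sum_sq,
      PySem.Dict.foldl_insert_getD_add_one_eq_counter]
  simp [PySem.Dict.values, PySem.Dict.items_counter, Function.comp_def]
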